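-- pv_equiv track=rewrite | github.com/Vigneswar-A/vigneswar-a.github.io | programming/leetcode/3514.py | shortestDistanceAfterQueries
-- ===== SOURCE A (Python) =====
-- from typing import List
--
-- def shortestDistanceAfterQueries(n: int, queries: List[List[int]]) -> List[int]:
--
--     link = [*range(1, n)]+[-1]
--     res = []
--     dist = n-1
--     for u,v in queries:
--         if link[u] != -1 and link[u] < v:
--             curr = link[u]
--             while curr != v:
--                 link[curr], curr = -1, link[curr]
--                 dist -= 1
--             link[u] = v
--         res.append(dist)
--     return res
-- ===== SOURCE B (Python) =====
-- from bisect import bisect_left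
-- from typing import List
--
-- def shortestDistanceAfterQueries(n: int, queries: List[List[int]]) -> List[int]:
--     kept = list(range(n))          # nodes still on the path, sorted
--     res = []
--     for u, v in queries:
--         i = bisect_left(kept, u)
--         if i < len(kept) and kept[i] == u:   # u still present
--             j = bisect_left(kept, v)
--             if i + 1 < j:                    # some present nodes lie strictly between u and v
--                 del kept[i+1:j]
--         res.append(len(kept) - 1)
--     return res
-- ===== Notes on version B (the rewrite author's own statement) =====
-- stated objective: alternative
-- what changed: Replaces A's linked-list next-pointer array with one-by-one pointer chasing/invalidation by a sorted list of surviving nodes, binary search (bisect) for the endpoints and one bulk slice deletion per query; Pre_ restricts to the problem's natural domain (each query [u,v] with 0 <= u < n and v < n unless v <= u+1, and no later query reverse-crossing an earlier one, i.e. no i<j with u_j < u_i < v_j < v_i), outside which A index-wraps negative u, raises, or chases pointers forever.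
-- outside the precondition, e.g. on shortestDistanceAfterQueries(3, [[-3, 2]]): A returns [1], B returns [2]; on shortestDistanceAfterQueries(5, [[1, 4], [2, 4], [1, 3]]): A returns [2, 2, 2], B returns [2, 2, 2]; on shortestDistanceAfterQueries(4, [[0, 3], [1, 9]]): A returns [1, 1], B returns [1, 1]
import Mathlib
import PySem

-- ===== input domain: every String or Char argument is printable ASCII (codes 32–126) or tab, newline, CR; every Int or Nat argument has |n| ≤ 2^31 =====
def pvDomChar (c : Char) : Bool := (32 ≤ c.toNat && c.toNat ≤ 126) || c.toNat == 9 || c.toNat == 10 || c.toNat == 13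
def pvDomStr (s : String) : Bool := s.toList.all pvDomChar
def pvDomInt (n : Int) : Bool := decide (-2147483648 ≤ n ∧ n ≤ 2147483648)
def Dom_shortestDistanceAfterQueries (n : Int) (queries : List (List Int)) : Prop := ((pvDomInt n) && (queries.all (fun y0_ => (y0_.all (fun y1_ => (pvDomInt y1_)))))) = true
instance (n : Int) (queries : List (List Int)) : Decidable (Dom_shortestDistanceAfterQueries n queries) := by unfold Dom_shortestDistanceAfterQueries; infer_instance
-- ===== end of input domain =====

-- B replaces A's next-pointer array (pointer chasing with one-by-one invalidation) by a
-- sorted list of surviving nodes with binary search and one bulk slice deletion per query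
-- (objective: alternative — a different data structure, not a speed claim).

-- ===== PORT A =====
-- the inner `while curr != v` loop of A; the fuel argument only makes the recursion total
-- (outside Pre_ the Python loop can chase pointers forever): `none` = A raises or diverges
def pvACollapse : Nat → List Int → Int → Int → Int → Option (List Int × Int)
  | 0, _, _, _, _ => none
  | fuel+1, link, curr, v, dist =>
    if curr = v then some (link, dist)
    else
      match PySem.List.pyGet? link curr with
      | none => none
      | some nxt =>
        match PySem.List.pySet? link curr (-1) with
        | none => none
        | some link' => pvACollapse fuel link' nxt v (dist - 1)

-- the `for u,v in queries` loop of A (`none` = unpack error / IndexError / divergence)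
def pvALoop : List (List Int) → List Int → Int → List Int → Option (List Int)
  | [], _, _, res => some res
  | q :: qs, link, dist, res =>
    match q with
    | [u, v] =>
      match PySem.List.pyGet? link u with
      | none => none
      | some lu =>
        if lu ≠ -1 ∧ lu < v then
          match pvACollapse (link.length + 1) link lu v dist with
          | none => none
          | some (link', dist') =>
            match PySem.List.pySet? link' u v with
            | none => none
            | some link'' => pvALoop qs link'' dist' (res ++ [dist'])
        else pvALoop qs link dist (res ++ [dist])
    | _ => none

def shortestDistanceAfterQueries (n : Int) (queries : List (List Int)) : List Int :=
  match pvALoop queries (PySem.List.pyRange 1 n 1 ++ [-1]) (n - 1) [] with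
  | some res => res
  | none => []

-- ===== PORT B =====
-- the `for u,v in queries` loop of B over the sorted list `kept` of surviving nodes
def pvBLoop : List (List Int) → List Int → List Int → Option (List Int)
  | [], _, res => some res
  | q :: qs, kept, res =>
    match q with
    | [u, v] =>
      let i := PySem.List.bisectLeft kept u
      let kept' :=
        if PySem.List.pyGet? kept (i : Int) = some u then
          let j := PySem.List.bisectLeft kept v
          if i + 1 < j then
            PySem.List.slice kept none (some ((i : Int) + 1)) ++
              PySem.List.slice kept (some (j : Int)) none
          else kept
        else kept
      pvBLoop qs kept' (res ++ [(kept'.length : Int) - 1])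
    | _ => none

def shortestDistanceAfterQueries_alt (n : Int) (queries : List (List Int)) : List Int :=
  match pvBLoop queries (PySem.List.pyRange 0 n 1) [] with
  | some res => res
  | none => []

-- ===== PRECONDITION & SPEC =====
def pvQU (q : List Int) : Int := q.getD 0 0
def pvQV (q : List Int) : Int := q.getD 1 0

-- Pre_ is the problem's natural domain: every query is a pair [u,v] with 0 ≤ u < n and
-- (unless it is a trivial no-op with v ≤ u+1) v < n, and no later query reverse-crosses an
-- earlier one (no i < j with u_j < u_i < v_j < v_i).  Outside it A index-wraps a negative u,
-- raises IndexError/ValueError, or chases pointers forever; it also excludes some inputs on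
-- which A happens to return because the offending collapse is never triggered — see the
-- cites in the claim (A and B agree on those).
def Pre_shortestDistanceAfterQueries (n : Int) (queries : List (List Int)) : Prop :=
  (∀ q ∈ queries, q.length = 2 ∧ 0 ≤ pvQU q ∧ pvQU q < n ∧ (pvQV q ≤ pvQU q + 1 ∨ pvQV q < n)) ∧
  queries.Pairwise (fun p q => ¬(pvQU q < pvQU p ∧ pvQU p < pvQV q ∧ pvQV q < pvQV p))

instance (n : Int) (queries : List (List Int)) : Decidable (Pre_shortestDistanceAfterQueries n queries) := by
  unfold Pre_shortestDistanceAfterQueries; infer_instance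

def pvWitness_shortestDistanceAfterQueries : Int × List (List Int) := (5, [[0, 2], [2, 4]])

def Spec_shortestDistanceAfterQueries (n : Int) (queries : List (List Int)) (out : List Int) : Prop := out = shortestDistanceAfterQueries_alt n queries
instance (n : Int) (queries : List (List Int)) (out : List Int) : Decidable (Spec_shortestDistanceAfterQueries n queries out) := by unfold Spec_shortestDistanceAfterQueries; infer_instance

-- ===== CLAIM (what is proved, stated in full; the proofs are below) =====
def Claim_equal_shortestDistanceAfterQueries : Prop := ∀ (n : Int) (queries : List (List Int)), Dom_shortestDistanceAfterQueries n queries → Pre_shortestDistanceAfterQueries n queries → Spec_shortestDistanceAfterQueries n queries (shortestDistanceAfterQueries n queries)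

-- ===== LEMMAS AND PROOFS =====

def pvNext (kept : List Int) (w : Int) : Int :=
  match kept.find? (fun x => decide (w < x)) with
  | some x => x
  | none => -1

lemma pvNext_eq_getD (kept : List Int) (w : Int) :
    pvNext kept w = (kept.find? (fun x => decide (w < x))).getD (-1) := by
  unfold pvNext; cases kept.find? (fun x => decide (w < x)) <;> rfl

lemma pvNext_split (X R : List Int) (x : Int) (h : (X ++ x :: R).Pairwise (· < ·)) :
    pvNext (X ++ x :: R) x = R.headD (-1) := by
  induction X with
  | nil =>
    simp only [List.nil_append, pvNext_eq_getD]
    rw [List.find?_cons_of_neg (by simp)]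
    cases R with
    | nil => simp
    | cons r R' =>
      have hxr : x < r := (List.pairwise_cons.mp h).1 r (by simp)
      rw [List.find?_cons_of_pos (by simpa using hxr)]
      simp
  | cons a X ih =>
    have hax : a < x := (List.pairwise_cons.mp h).1 x (by simp)
    rw [List.cons_append, pvNext_eq_getD, List.find?_cons_of_neg (by simp; omega),
      ← pvNext_eq_getD]
    exact ih (List.pairwise_cons.mp h).2

lemma pvNext_min (kept : List Int) (w : Int) (h : kept.Pairwise (· < ·)) :
    (pvNext kept w = -1 ∧ ∀ y ∈ kept, ¬ w < y) ∨
      (pvNext kept w ∈ kept ∧ w < pvNext kept w ∧ ∀ y ∈ kept, w < y → pvNext kept w ≤ y) := by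
  induction kept with
  | nil => left; exact ⟨rfl, by simp⟩
  | cons a k ih =>
    by_cases hwa : w < a
    · right
      rw [pvNext_eq_getD, List.find?_cons_of_pos (by simpa using hwa)]
      refine ⟨by simp, by simpa using hwa, ?_⟩
      intro y hy hwy
      simp only [Option.getD_some]
      rcases List.mem_cons.mp hy with rfl | hy
      · omega
      · exact le_of_lt ((List.pairwise_cons.mp h).1 y hy)
    · rw [pvNext_eq_getD, List.find?_cons_of_neg (by simpa using hwa), ← pvNext_eq_getD]
      rcases ih (List.pairwise_cons.mp h).2 with ⟨h1, h2⟩ | ⟨h1, h2, h3⟩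
      · left
        refine ⟨h1, ?_⟩
        intro y hy
        rcases List.mem_cons.mp hy with rfl | hy
        · exact hwa
        · exact h2 y hy
      · right
        refine ⟨List.mem_cons_of_mem _ h1, h2, ?_⟩
        intro y hy hwy
        rcases List.mem_cons.mp hy with rfl | hy
        · exact absurd hwy hwa
        · exact h3 y hy hwy

lemma pvNext_eq_of_min (kept : List Int) (w z : Int) (h : kept.Pairwise (· < ·))
    (hz : z ∈ kept) (hwz : w < z) (hmin : ∀ y ∈ kept, w < y → z ≤ y) :
    pvNext kept w = z := by
  rcases pvNext_min kept w h with ⟨_, h2⟩ | ⟨h1, h2, h3⟩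
  · exact absurd hwz (h2 z hz)
  · have := h3 z hz hwz
    have := hmin _ h1 h2
    omega

lemma pv_split1 (kept : List Int) (v : Int) (h : kept.Pairwise (· < ·)) (hv : v ∈ kept) :
    ∃ M S, kept = M ++ v :: S ∧ (∀ x ∈ M, x < v) ∧ (∀ x ∈ S, v < x) := by
  induction kept with
  | nil => cases hv
  | cons a k ih =>
    rcases List.mem_cons.mp hv with rfl | hv
    · exact ⟨[], k, rfl, by simp, (List.pairwise_cons.mp h).1⟩
    · obtain ⟨M, S, hk, hM, hS⟩ := ih (List.pairwise_cons.mp h).2 hv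
      refine ⟨a :: M, S, by simp [hk], ?_, hS⟩
      intro x hx
      rcases List.mem_cons.mp hx with rfl | hx
      · exact (List.pairwise_cons.mp h).1 v (by rw [hk]; exact List.mem_append_right _ (List.mem_cons_self ..))
      · exact hM x hx

lemma pv_sorted_split (kept : List Int) (u v : Int) (h : kept.Pairwise (· < ·))
    (hu : u ∈ kept) (hv : v ∈ kept) (huv : u < v) :
    ∃ P M S, kept = P ++ u :: (M ++ v :: S) ∧ (∀ x ∈ P, x < u) ∧
      (∀ x ∈ M, u < x ∧ x < v) ∧ (∀ x ∈ S, v < x) := by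
  obtain ⟨P, R, rfl, hP, hR⟩ := pv_split1 kept u h hu
  have hsR : (u :: R).Pairwise (· < ·) := (List.pairwise_append.mp h).2.1
  have hvR : v ∈ R := by
    rcases List.mem_append.mp hv with hv | hv
    · exact absurd (hP v hv) (by omega)
    · rcases List.mem_cons.mp hv with rfl | hv
      · omega
      · exact hv
  obtain ⟨M, S, hR2, hM, hS⟩ := pv_split1 R v (List.pairwise_cons.mp hsR).2 hvR
  refine ⟨P, M, S, by rw [hR2], hP, ?_, hS⟩
  intro x hx
  exact ⟨(List.pairwise_cons.mp hsR).1 x (by rw [hR2]; exact List.mem_append_left _ hx), hM x hx⟩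

lemma pv_bisect_eq (P R : List Int) (u : Int) (h : (P ++ u :: R).Pairwise (· ≤ ·))
    (hP : ∀ x ∈ P, x < u) : PySem.List.bisectLeft (P ++ u :: R) u = P.length := by
  obtain ⟨h1, h2, h3⟩ := PySem.List.bisectLeft_spec (P ++ u :: R) u h
  set i := PySem.List.bisectLeft (P ++ u :: R) u with hi
  have hlen : P.length < (P ++ u :: R).length := by simp
  have hgetP : (P ++ u :: R)[P.length]'hlen = u := by
    rw [List.getElem_append_right (le_refl _)]
    simp
  rcases lt_trichotomy i P.length with hlt | heq | hgt
  · have hle : i < (P ++ u :: R).length := by omega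
    have : u ≤ (P ++ u :: R)[i]'hle := h3 i hle (le_refl _)
    have hPi : (P ++ u :: R)[i]'hle = P[i]'(by omega) := List.getElem_append_left (by omega)
    have := hP (P[i]'(by omega)) (List.getElem_mem _)
    omega
  · exact heq
  · have : (P ++ u :: R)[P.length]'hlen < u := h2 P.length hlen hgt
    omega

lemma pv_foldl_set_length (M : List Int) : ∀ (link : List Int),
    (M.foldl (fun l c => PySem.List.pySetD l c (-1)) link).length = link.length := by
  induction M with
  | nil => intro link; rfl
  | cons c M ih => intro link; rw [List.foldl_cons, ih, PySem.List.length_pySetD]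

lemma pv_pyGet?_pySetD_ne (l : List Int) (c w x : Int) (hc : 0 ≤ c) (hw : 0 ≤ w) (hne : w ≠ c) :
    PySem.List.pyGet? (PySem.List.pySetD l c x) w = PySem.List.pyGet? l w := by
  rw [PySem.List.pySetD_of_nonneg _ _ hc, PySem.List.pyGet?_of_nonneg _ hw,
    PySem.List.pyGet?_of_nonneg _ hw]
  rw [List.getElem?_set_ne (by omega)]

lemma pv_pyGet?_pySetD_self (l : List Int) (c x : Int) (hc : 0 ≤ c) (hlt : c < (l.length : Int)) :
    PySem.List.pyGet? (PySem.List.pySetD l c x) c = some x := by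
  rw [PySem.List.pySetD_of_nonneg _ _ hc, PySem.List.pyGet?_of_nonneg _ hc]
  rw [List.getElem?_set_self (by omega)]

lemma pv_foldl_set_get (M : List Int) : ∀ (link : List Int) (w : Int), 0 ≤ w →
    (∀ x ∈ M, 0 ≤ x ∧ x < (link.length : Int)) → M.Pairwise (· < ·) →
    PySem.List.pyGet? (M.foldl (fun l c => PySem.List.pySetD l c (-1)) link) w =
      if w ∈ M then some (-1) else PySem.List.pyGet? link w := by
  induction M with
  | nil => intro link w _ _ _; simp
  | cons c M ih =>
    intro link w hw hb hp
    obtain ⟨⟨hc0, hclen⟩, hbM⟩ : (0 ≤ c ∧ c < (link.length : Int)) ∧ ∀ x ∈ M, 0 ≤ x ∧ x < (link.length : Int) := by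
      exact ⟨hb c (by simp), fun x hx => hb x (List.mem_cons_of_mem _ hx)⟩
    rw [List.foldl_cons]
    have hlen2 : ((PySem.List.pySetD link c (-1)).length : Int) = (link.length : Int) := by
      rw [PySem.List.length_pySetD]
    rw [ih (PySem.List.pySetD link c (-1)) w hw (by rw [hlen2]; exact hbM) (List.pairwise_cons.mp hp).2]
    by_cases hwc : w = c
    · subst hwc
      have hwM : w ∉ M := fun hm => absurd ((List.pairwise_cons.mp hp).1 w hm) (by omega)
      simp only [hwM, if_false, List.mem_cons, true_or, if_true]
      exact pv_pyGet?_pySetD_self link w (-1) hw hclen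
    · simp only [List.mem_cons, hwc, false_or]
      by_cases hwM : w ∈ M
      · simp [hwM]
      · simp only [hwM, if_false]
        exact pv_pyGet?_pySetD_ne link c w (-1) hc0 hw hwc

lemma pv_walk (v : Int) : ∀ (M : List Int) (link : List Int) (dist : Int) (fuel : Nat),
    M.length < fuel → (∀ x ∈ M, 0 ≤ x) → (∀ x ∈ M, x < v) → M.Pairwise (· < ·) →
    (∀ k (hk : k < M.length),
      PySem.List.pyGet? link M[k] = some ((M.drop (k+1)).headD v)) →
    pvACollapse fuel link (M.headD v) v dist =
      some (M.foldl (fun l c => PySem.List.pySetD l c (-1)) link, dist - M.length) := by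
  intro M
  induction M with
  | nil =>
    intro link dist fuel hfuel _ _ _ _
    match fuel, hfuel with
    | fuel+1, _ => simp [pvACollapse]
  | cons c M ih =>
    intro link dist fuel hfuel h0 hv hp hget
    match fuel, hfuel with
    | fuel+1, hfuel =>
      have hcv : c < v := hv c (by simp)
      have hc0 : 0 ≤ c := h0 c (by simp)
      have hget0 := hget 0 (by simp)
      simp only [List.getElem_cons_zero, List.drop_succ_cons, List.drop_zero] at hget0
      have hin : PySem.Raise.InRange link.length c := by
        by_contra hnot
        have : PySem.List.pyGet? link c = none := (PySem.List.pyGet?_eq_none_iff link c).mpr hnot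
        rw [this] at hget0; cases hget0
      obtain ⟨l2, hl2⟩ : ∃ l2, PySem.List.pySet? link c (-1) = some l2 := by
        cases hps : PySem.List.pySet? link c (-1) with
        | none => exact absurd ((PySem.List.pySet?_eq_none_iff link c (-1)).mp hps) (by simpa using hin)
        | some l2 => exact ⟨l2, rfl⟩
      have hl2d : l2 = PySem.List.pySetD link c (-1) := by
        simp [PySem.List.pySetD, hl2]
      show pvACollapse (fuel+1) link ((c :: M).headD v) v dist = _
      rw [pvACollapse]
      rw [if_neg (by simp; omega)]
      simp only [List.headD_cons] at *
      rw [hget0, hl2]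
      have ihres := ih l2 (dist - 1) fuel (by simpa using hfuel)
        (fun x hx => h0 x (List.mem_cons_of_mem _ hx))
        (fun x hx => hv x (List.mem_cons_of_mem _ hx))
        (List.pairwise_cons.mp hp).2
        (fun k hk => by
          have hgk := hget (k+1) (by simpa using hk)
          simp only [List.getElem_cons_succ, List.drop_succ_cons] at hgk
          rw [hl2d, pv_pyGet?_pySetD_ne link c _ (-1) hc0 (h0 _ (List.mem_cons_of_mem _ (List.getElem_mem hk)))
            (by have := (List.pairwise_cons.mp hp).1 (M[k]) (List.getElem_mem hk); omega)]
          exact hgk)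
      show pvACollapse fuel l2 (M.headD v) v (dist - 1) = _
      rw [ihres]
      simp only [List.foldl_cons, hl2d]
      congr 1
      congr 1
      simp only [List.length_cons]
      omega

lemma pv_pyRange_sorted (a b : Int) : (PySem.List.pyRange a b 1).Pairwise (· < ·) := by
  generalize hm : (b - a).toNat = m
  induction m generalizing a with
  | zero =>
    have : (PySem.List.pyRange a b 1).length = 0 := by
      rw [PySem.List.length_pyRange_one]; omega
    rw [List.eq_nil_of_length_eq_zero this]
    exact List.Pairwise.nil
  | succ m ih =>
    rw [PySem.List.pyRange_one_cons (by omega)]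
    refine List.pairwise_cons.mpr ⟨?_, ih (a+1) (by omega)⟩
    intro x hx
    have := PySem.List.mem_pyRange_one.mp hx
    omega

lemma pv_getElem?_pyRange (k : Nat) : ∀ (a b : Int), (k : Int) < b - a →
    (PySem.List.pyRange a b 1)[k]? = some (a + k) := by
  induction k with
  | zero =>
    intro a b h
    rw [PySem.List.pyRange_one_cons (by omega)]
    simp
  | succ k ih =>
    intro a b h
    rw [PySem.List.pyRange_one_cons (by omega)]
    simp only [List.getElem?_cons_succ]
    rw [ih (a+1) b (by omega)]
    congr 1
    push_cast
    ring

def pvLinkSpec (n : Int) (kept link : List Int) : Prop :=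
  link.length = n.toNat ∧ ∀ w : Int, 0 ≤ w → w < n →
    PySem.List.pyGet? link w = some (if w ∈ kept then pvNext kept w else -1)

lemma pv_init_linkspec (n : Int) (hn : 1 ≤ n) :
    pvLinkSpec n (PySem.List.pyRange 0 n 1) (PySem.List.pyRange 1 n 1 ++ [-1]) := by
  have len1 : (PySem.List.pyRange 1 n 1).length = (n-1).toNat := by
    rw [PySem.List.length_pyRange_one]
  constructor
  · simp [len1]; omega
  · intro w hw0 hwn
    have hmem : w ∈ PySem.List.pyRange 0 n 1 := PySem.List.mem_pyRange_one.mpr ⟨hw0, hwn⟩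
    rw [PySem.List.pyGet?_of_nonneg _ hw0, if_pos hmem]
    by_cases hlast : w < n - 1
    · rw [List.getElem?_append_left (by omega)]
      rw [pv_getElem?_pyRange w.toNat 1 n (by omega)]
      have hnext : pvNext (PySem.List.pyRange 0 n 1) w = w + 1 := by
        apply pvNext_eq_of_min _ _ _ (pv_pyRange_sorted 0 n)
          (PySem.List.mem_pyRange_one.mpr (by omega)) (by omega)
        intro y hy hwy
        have := PySem.List.mem_pyRange_one.mp hy
        omega
      rw [hnext]
      congr 1
      omega
    · have hw : w = n - 1 := by omega
      rw [List.getElem?_append_right (by omega)]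
      have hidx : w.toNat - (PySem.List.pyRange 1 n 1).length = 0 := by omega
      rw [hidx]
      have hnext : pvNext (PySem.List.pyRange 0 n 1) w = -1 := by
        rcases pvNext_min _ w (pv_pyRange_sorted 0 n) with ⟨h1, _⟩ | ⟨h1, h2, _⟩
        · exact h1
        · have := PySem.List.mem_pyRange_one.mp h1
          omega
      rw [hnext]
      rfl

def pvCover (n : Int) (qs : List (List Int)) (kept : List Int) : Prop :=
  ∀ w : Int, 0 ≤ w → w < n → w ∉ kept →
    ∃ a b : Int, a < w ∧ w < b ∧ (∀ x ∈ kept, ¬(a < x ∧ x < b)) ∧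
      (∀ q ∈ qs, ¬(pvQU q < a ∧ a < pvQV q ∧ pvQV q < b))

def pvInv (n : Int) (qs : List (List Int)) (kept link : List Int) (dist : Int) : Prop :=
  kept.Pairwise (· < ·) ∧ (∀ w ∈ kept, 0 ≤ w ∧ w < n) ∧ pvLinkSpec n kept link ∧
  dist = (kept.length : Int) - 1 ∧ kept.length ≤ link.length ∧ pvCover n qs kept

lemma pv_headD_append (M S : List Int) (v : Int) : (M ++ v :: S).headD (-1) = M.headD v := by
  cases M <;> rfl

lemma pv_loop_eq (n : Int) : ∀ (qs : List (List Int)) (kept link : List Int) (dist : Int) (res : List Int),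
    (∀ q ∈ qs, q.length = 2 ∧ 0 ≤ pvQU q ∧ pvQU q < n ∧ (pvQV q ≤ pvQU q + 1 ∨ pvQV q < n)) →
    qs.Pairwise (fun p q => ¬(pvQU q < pvQU p ∧ pvQU p < pvQV q ∧ pvQV q < pvQV p)) →
    pvInv n qs kept link dist →
    pvALoop qs link dist res = pvBLoop qs kept res := by
  intro qs
  induction qs with
  | nil => intro kept link dist res _ _ _; rfl
  | cons q qs ih =>
    intro kept link dist res hperq hpair hinv
    obtain ⟨hsort, hbnd, ⟨hlen, hspec⟩, hdist, hklen, hcov⟩ := hinv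
    obtain ⟨hq2, hu0, hun, hv'⟩ := hperq q (List.mem_cons_self ..)
    obtain ⟨u, v, rfl⟩ : ∃ u v, q = [u, v] := by
      match q, hq2 with
      | [u, v], _ => exact ⟨u, v, rfl⟩
    simp only [pvQU, pvQV, List.getD_cons_zero, List.getD_cons_succ] at hu0 hun hv'
    have hgetu := hspec u hu0 hun
    have hih : ∀ kept' link' dist', pvInv n qs kept' link' dist' →
        pvALoop qs link' dist' (res ++ [dist']) = pvBLoop qs kept' (res ++ [dist']) := by
      intro kept' link' dist' hinv'
      exact ih kept' link' dist' (res ++ [dist'])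
        (fun q hq => hperq q (List.mem_cons_of_mem _ hq)) (List.pairwise_cons.mp hpair).2 hinv'
    have hcov' : pvCover n qs kept := by
      intro w h1 h2 h3
      obtain ⟨a, b, g1, g2, g3, g4⟩ := hcov w h1 h2 h3
      exact ⟨a, b, g1, g2, g3, fun q hq => g4 q (List.mem_cons_of_mem _ hq)⟩
    simp only [pvALoop, pvBLoop, hgetu]
    by_cases hukept : u ∈ kept
    · rw [if_pos hukept]
      set lu := pvNext kept u with hlu
      rcases pvNext_min kept u hsort with ⟨hlun, hnogt⟩ | ⟨hluk, hulu, hlumin⟩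
      · -- u is the last kept node: A reads -1 and skips
        rw [if_neg (by rw [hlu, hlun]; simp)]
        obtain ⟨P, R, hkeq, hP, hR⟩ := pv_split1 kept u hsort hukept
        have hle : kept.Pairwise (· ≤ ·) := hsort.imp le_of_lt
        have hi : PySem.List.bisectLeft kept u = P.length := by
          rw [hkeq]; exact pv_bisect_eq P R u (by rw [← hkeq]; exact hle) hP
        have hguard : PySem.List.pyGet? kept (PySem.List.bisectLeft kept u : Int) = some u := by
          rw [hi, hkeq]; exact PySem.List.pyGet?_append_length P R u
        rw [if_pos hguard]
        have hRnil : R = [] := by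
          cases R with
          | nil => rfl
          | cons r R' =>
            exact absurd (hR r (by simp))
              (hnogt r (by rw [hkeq]; exact List.mem_append_right _ (by simp)))
        subst hRnil
        have hj : PySem.List.bisectLeft kept v ≤ P.length + 1 := by
          have := (PySem.List.bisectLeft_spec kept v hle).1
          rw [hkeq] at this ⊢
          simpa using this
        rw [if_neg (by rw [hi]; omega)]
        rw [← hdist]
        exact hih kept link dist ⟨hsort, hbnd, ⟨hlen, hspec⟩, hdist, hklen, hcov'⟩
      · by_cases hfire : lu ≠ -1 ∧ lu < v
        · -- FIRE: the collapse runs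
          rw [if_pos hfire]
          have huv : u < v := by omega
          have hvn : v < n := by
            rcases hv' with h | h
            · omega
            · exact h
          have hv0 : 0 ≤ v := by have := (hbnd lu hluk).1; omega
          have hvkept : v ∈ kept := by
            by_contra hvk
            obtain ⟨a, b, hav, hvb, hhol, hfut⟩ := hcov v hv0 hvn hvk
            have hqv := hfut [u, v] (List.mem_cons_self ..)
            simp only [pvQU, pvQV, List.getD_cons_zero, List.getD_cons_succ] at hqv
            have hu_ab := hhol u hukept
            have hlu_ab := hhol lu hluk
            omega
          obtain ⟨P, M, S, hkeq, hP, hM, hS⟩ := pv_sorted_split kept u v hsort hukept hvkept huv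
          have hnextu : lu = M.headD v := by
            rw [hlu, hkeq, pvNext_split P _ u (by rw [← hkeq]; exact hsort), pv_headD_append]
          have hMne : M ≠ [] := by
            intro hMnil
            rw [hMnil] at hnextu
            simp at hnextu
            omega
          -- lengths and sortedness facts
          have hkl : kept.length = P.length + 1 + M.length + 1 + S.length := by
            simp [hkeq]; omega
          have hsubM : List.Sublist M kept := by
            rw [hkeq]
            exact ((List.sublist_append_left M (v :: S)).trans
              (List.sublist_cons_self u _)).trans (List.sublist_append_right P _)
          have hsortM : M.Pairwise (· < ·) := hsort.sublist hsubM
          have hnn : (link.length : Int) = n := by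
            rw [hlen]; omega
          have hMbnd : ∀ x ∈ M, 0 ≤ x ∧ x < (link.length : Int) := by
            intro x hx
            have := hbnd x (hsubM.mem hx)
            omega
          -- the collapse walk removes exactly the kept nodes strictly between u and v
          have hwalk := pv_walk v M link dist (link.length + 1) (by omega)
            (fun x hx => (hMbnd x hx).1) (fun x hx => (hM x hx).2) hsortM
            (fun k hk => by
              have hmemMk : M[k] ∈ kept := hsubM.mem (List.getElem_mem hk)
              have hbk := hbnd _ hmemMk
              rw [hspec _ hbk.1 hbk.2, if_pos hmemMk]
              have hM2 : M = M.take k ++ M[k] :: M.drop (k+1) := by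
                rw [← List.drop_eq_getElem_cons hk, List.take_append_drop]
              have hkeq3 : kept = (P ++ u :: M.take k) ++ M[k] :: (M.drop (k+1) ++ v :: S) := by
                rw [hkeq]
                have h5 : M ++ v :: S = List.take k M ++ M[k] :: (List.drop (k+1) M ++ v :: S) := by
                  conv_lhs => rw [hM2]
                  simp only [List.cons_append, List.append_assoc]
                rw [h5]
                simp only [List.cons_append, List.append_assoc]
              rw [hkeq3, pvNext_split _ _ _ (by rw [← hkeq3]; exact hsort), pv_headD_append])
          set linkW := M.foldl (fun l c => PySem.List.pySetD l c (-1)) link with hlinkW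
          have hlenW : linkW.length = link.length := pv_foldl_set_length M link
          obtain ⟨l2, hl2⟩ : ∃ l2, PySem.List.pySet? linkW u v = some l2 := by
            cases hps : PySem.List.pySet? linkW u v with
            | none =>
              exact absurd ((PySem.List.pySet?_eq_none_iff linkW u v).mp hps)
                (by simp [PySem.Raise.InRange, hlenW]; omega)
            | some l2 => exact ⟨l2, rfl⟩
          have hl2d : l2 = PySem.List.pySetD linkW u v := by simp [PySem.List.pySetD, hl2]
          rw [hnextu]
          simp only [hwalk, hl2]
          -- B side
          have hle : kept.Pairwise (· ≤ ·) := hsort.imp le_of_lt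
          have hi : PySem.List.bisectLeft kept u = P.length := by
            rw [hkeq]; exact pv_bisect_eq P _ u (by rw [← hkeq]; exact hle) hP
          have hguard : PySem.List.pyGet? kept (PySem.List.bisectLeft kept u : Int) = some u := by
            rw [hi, hkeq]; exact PySem.List.pyGet?_append_length P _ u
          rw [if_pos hguard]
          have hkeq2 : kept = (P ++ u :: M) ++ v :: S := by rw [hkeq]; simp
          have hj : PySem.List.bisectLeft kept v = P.length + 1 + M.length := by
            rw [hkeq2]
            have := pv_bisect_eq (P ++ u :: M) S v (by rw [← hkeq2]; exact hle)
              (fun x hx => by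
                rcases List.mem_append.mp hx with hx | hx
                · exact lt_trans (hP x hx) huv
                · rcases List.mem_cons.mp hx with rfl | hx
                  · exact huv
                  · exact (hM x hx).2)
            rw [this]
            simp only [List.length_append, List.length_cons]
            omega
          have hMlen : 0 < M.length := List.length_pos_of_ne_nil hMne
          rw [if_pos (by rw [hi, hj]; omega)]
          have hsl1 : PySem.List.slice kept none (some ((PySem.List.bisectLeft kept u : Int) + 1)) = P ++ [u] := by
            rw [hi]
            have hc : ((P.length : Int) + 1) = ((P.length + 1 : Nat) : Int) := by push_cast; ring
            rw [hc, PySem.List.slice_to_natCast, hkeq, List.take_append]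
            simp
          have hsl2 : PySem.List.slice kept (some (PySem.List.bisectLeft kept v : Int)) none = v :: S := by
            rw [hj, PySem.List.slice_from_natCast, hkeq2]
            have hc : P.length + 1 + M.length = (P ++ u :: M).length := by simp; omega
            rw [hc, List.drop_left]
          rw [hsl1, hsl2]
          have hkeq' : (P ++ [u]) ++ v :: S = P ++ u :: v :: S := by simp
          rw [hkeq']
          set kept' := P ++ u :: v :: S with hkept'
          -- the new list is a sublist of the old one
          have hsub' : List.Sublist kept' kept := by
            rw [hkeq, hkept']
            exact List.Sublist.append_left
              (List.Sublist.cons₂ u (List.sublist_append_right M (v :: S))) P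
          have hsort' : kept'.Pairwise (· < ·) := hsort.sublist hsub'
          have hkl' : kept'.length = P.length + 1 + 1 + S.length := by simp [hkept']; omega
          have hdist' : dist - M.length = (kept'.length : Int) - 1 := by
            rw [hdist, hkl, hkl']
            push_cast
            ring
          rw [hdist']
          -- membership of kept' spelled out
          have hmem' : ∀ x, x ∈ kept' ↔ (x ∈ P ∨ x = u ∨ x = v ∨ x ∈ S) := by
            intro x; rw [hkept']; simp
          have hmem : ∀ x, x ∈ kept ↔ (x ∈ P ∨ x = u ∨ x ∈ M ∨ x = v ∨ x ∈ S) := by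
            intro x; rw [hkeq]; simp; try tauto
          have hMnotk' : ∀ x ∈ M, x ∉ kept' := by
            intro x hx hx'
            obtain ⟨hxu, hxv⟩ := hM x hx
            rcases (hmem' x).mp hx' with h | h | h | h
            · exact absurd (hP x h) (by omega)
            · omega
            · omega
            · exact absurd (hS x h) (by omega)
          apply hih kept' l2 ((kept'.length : Int) - 1)
          refine ⟨hsort', fun w hw => hbnd w (hsub'.mem hw), ⟨?_, ?_⟩, rfl, ?_, ?_⟩
          · rw [hl2d, PySem.List.length_pySetD, hlenW, hlen]
          · -- the link array after the collapse encodes the new kept list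
            intro w h1 h2
            by_cases hwu : w = u
            · subst hwu
              rw [hl2d, pv_pyGet?_pySetD_self linkW w v h1 (by rw [hlenW]; omega)]
              rw [if_pos ((hmem' w).mpr (Or.inr (Or.inl rfl)))]
              rw [hkept', pvNext_split P _ w (by rw [← hkept']; exact hsort')]
              rfl
            · rw [hl2d, pv_pyGet?_pySetD_ne linkW u w v hu0 h1 hwu, hlinkW,
                pv_foldl_set_get M link w h1 hMbnd hsortM]
              by_cases hwM : w ∈ M
              · rw [if_pos hwM, if_neg (hMnotk' w hwM)]
              · rw [if_neg hwM, hspec w h1 h2]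
                have hiff : w ∈ kept' ↔ w ∈ kept := by
                  rw [hmem', hmem]; tauto
                by_cases hwk : w ∈ kept'
                · rw [if_pos hwk, if_pos (hiff.mp hwk)]
                  rcases pvNext_min kept w hsort with ⟨e1, e2⟩ | ⟨e1, e2, e3⟩
                  · rw [e1]
                    rcases pvNext_min kept' w hsort' with ⟨f1, _⟩ | ⟨f1, f2, _⟩
                    · rw [f1]
                    · exact absurd f2 (e2 _ (hsub'.mem f1))
                  · have hzM : pvNext kept w ∉ M := by
                      intro hzM'
                      obtain ⟨hz1, hz2⟩ := hM _ hzM'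
                      rcases (hmem' w).mp hwk with h | h | h | h
                      · exact absurd (e3 u hukept (by have := hP w h; omega)) (by have := hP w h; omega)
                      · exact hwu h
                      · omega
                      · have := hS w h; omega
                    have hz' : pvNext kept w ∈ kept' := by
                      rw [hmem']
                      rcases (hmem _).mp e1 with h | h | h | h | h
                      · exact Or.inl h
                      · exact Or.inr (Or.inl h)
                      · exact absurd h hzM
                      · exact Or.inr (Or.inr (Or.inl h))
                      · exact Or.inr (Or.inr (Or.inr h))
                    rw [pvNext_eq_of_min kept' w _ hsort' hz' e2
                      (fun y hy hwy => e3 y (hsub'.mem hy) hwy)]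
                · rw [if_neg hwk, if_neg (fun h => hwk (hiff.mpr h))]
          · rw [hl2d, PySem.List.length_pySetD, hlenW]
            omega
          · -- cover invariant for the remaining queries
            intro w h1 h2 h3
            by_cases hwM : w ∈ M
            · refine ⟨u, v, (hM w hwM).1, (hM w hwM).2, ?_, ?_⟩
              · intro x hx
                rcases (hmem' x).mp hx with h | h | h | h
                · have := hP x h; omega
                · omega
                · omega
                · have := hS x h; omega
              · intro q' hq'
                have := (List.pairwise_cons.mp hpair).1 q' hq'
                simpa [pvQU, pvQV] using this
            · have hwkept : w ∉ kept := by
                intro hk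
                rcases (hmem w).mp hk with h | h | h | h | h
                · exact h3 ((hmem' w).mpr (Or.inl h))
                · exact h3 ((hmem' w).mpr (Or.inr (Or.inl h)))
                · exact hwM h
                · exact h3 ((hmem' w).mpr (Or.inr (Or.inr (Or.inl h))))
                · exact h3 ((hmem' w).mpr (Or.inr (Or.inr (Or.inr h))))
              obtain ⟨a, b, g1, g2, g3, g4⟩ := hcov' w h1 h2 hwkept
              exact ⟨a, b, g1, g2, fun x hx => g3 x (hsub'.mem hx), g4⟩
        · -- u kept with successor but successor ≥ v: both skip
          rw [if_neg hfire]
          have hluv : v ≤ lu := by omega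
          obtain ⟨P, R, hkeq, hP, hR⟩ := pv_split1 kept u hsort hukept
          have hle : kept.Pairwise (· ≤ ·) := hsort.imp le_of_lt
          have hi : PySem.List.bisectLeft kept u = P.length := by
            rw [hkeq]; exact pv_bisect_eq P R u (by rw [← hkeq]; exact hle) hP
          have hguard : PySem.List.pyGet? kept (PySem.List.bisectLeft kept u : Int) = some u := by
            rw [hi, hkeq]; exact PySem.List.pyGet?_append_length P R u
          rw [if_pos hguard]
          have hj : PySem.List.bisectLeft kept v ≤ P.length + 1 := by
            obtain ⟨s1, s2, s3⟩ := PySem.List.bisectLeft_spec kept v hle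
            by_contra hgt
            rw [not_le] at hgt
            have hidx : P.length + 1 < kept.length := by omega
            have hlt : kept[P.length + 1]'hidx < v := s2 (P.length + 1) hidx (by omega)
            cases R with
            | nil =>
              rw [hkeq] at hidx; simp at hidx
            | cons r R' =>
              have hr : kept[P.length + 1]'hidx = r := by
                simp only [hkeq]
                rw [List.getElem_append_right (by omega)]
                simp
              have hlur : lu = r := by
                rw [hlu, hkeq, pvNext_split P _ u (by rw [← hkeq]; exact hsort)]
                rfl
              omega
          rw [if_neg (by rw [hi]; omega)]
          rw [← hdist]
          exact hih kept link dist ⟨hsort, hbnd, ⟨hlen, hspec⟩, hdist, hklen, hcov'⟩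
    · -- u not kept: A reads -1 and skips; B's membership guard fails
      rw [if_neg hukept]
      rw [if_neg (by simp)]
      have hguard : ¬ PySem.List.pyGet? kept (PySem.List.bisectLeft kept u : Int) = some u := by
        intro hg
        rw [PySem.List.pyGet?_natCast] at hg
        exact hukept (List.mem_of_getElem? hg)
      rw [if_neg hguard]
      rw [← hdist]
      exact hih kept link dist ⟨hsort, hbnd, ⟨hlen, hspec⟩, hdist, hklen, hcov'⟩

lemma pv_init_inv (n : Int) (qs : List (List Int)) (hn : 1 ≤ n) :
    pvInv n qs (PySem.List.pyRange 0 n 1) (PySem.List.pyRange 1 n 1 ++ [-1]) (n - 1) := by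
  refine ⟨pv_pyRange_sorted 0 n, ?_, pv_init_linkspec n hn, ?_, ?_, ?_⟩
  · intro w hw
    have := PySem.List.mem_pyRange_one.mp hw
    omega
  · rw [PySem.List.length_pyRange_one]
    omega
  · simp only [PySem.List.length_pyRange_one, List.length_append, List.length_cons,
      List.length_nil]
    omega
  · intro w h1 h2 h3
    exact absurd (PySem.List.mem_pyRange_one.mpr ⟨h1, h2⟩) h3

-- ===== VERDICT (by name: the statement is the Claim_ definition above) =====
theorem shortestDistanceAfterQueries_spec : Claim_equal_shortestDistanceAfterQueries := by
  unfold Claim_equal_shortestDistanceAfterQueries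
  intro n queries hDom hPre
  unfold Spec_shortestDistanceAfterQueries
  obtain ⟨hq, hpair⟩ := hPre
  cases queries with
  | nil => rfl
  | cons q qs =>
    have hn : 1 ≤ n := by
      obtain ⟨_, h1, h2, _⟩ := hq q (List.mem_cons_self ..)
      omega
    have hloop := pv_loop_eq n (q :: qs) (PySem.List.pyRange 0 n 1)
      (PySem.List.pyRange 1 n 1 ++ [-1]) (n - 1) [] hq hpair (pv_init_inv n (q :: qs) hn)
    unfold shortestDistanceAfterQueries shortestDistanceAfterQueries_alt
    rw [hloop]
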